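-- pv_equiv track=rewrite | github.com/ACSKits/opc-encoder | opc-encoder/encoding_remover.py | parse_old_lines
-- ===== SOURCE A (Python) =====
-- def parse_old_lines(path: str, old_lines: list) -> list:
--     # Remove lines with encoding markers and adjacent empty lines
--     new_lines = []
--     skip_next = False
--
--     for i, line in enumerate(old_lines):
--         if any(key in line for key in ["P103", "#6"]):
--             skip_next = True
--             continue
--         if skip_next:
--             if line.strip() == "":
--                 skip_next = False
--                 continue
--         new_lines.append(line)
--
--     return new_lines
-- ===== SOURCE B (Python) =====
-- def parse_old_lines(path: str, old_lines: list) -> list: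
--     # Block decomposition: split at blank lines; a blank separator is removed
--     # exactly when its preceding block contains an encoding marker.
--     def has_marker(line):
--         return "P103" in line or "#6" in line
--
--     new_lines = []
--     i = 0
--     n = len(old_lines)
--     while i < n:
--         j = i
--         while j < n and old_lines[j].strip() != "":
--             j += 1
--         block = old_lines[i:j]
--         new_lines.extend(l for l in block if not has_marker(l))
--         if j < n and not any(has_marker(l) for l in block):
--             new_lines.append(old_lines[j])
--         i = j + 1
--     return new_lines
-- ===== Notes on version B (the rewrite author's own statement) =====
-- stated objective: alternative
-- what changed: A's single pass with a skip_next flag is replaced by a block decomposition: scan to each blank separator, emit the block's non-marker lines, and keep the separator only if the block contained no marker.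
import Mathlib
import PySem

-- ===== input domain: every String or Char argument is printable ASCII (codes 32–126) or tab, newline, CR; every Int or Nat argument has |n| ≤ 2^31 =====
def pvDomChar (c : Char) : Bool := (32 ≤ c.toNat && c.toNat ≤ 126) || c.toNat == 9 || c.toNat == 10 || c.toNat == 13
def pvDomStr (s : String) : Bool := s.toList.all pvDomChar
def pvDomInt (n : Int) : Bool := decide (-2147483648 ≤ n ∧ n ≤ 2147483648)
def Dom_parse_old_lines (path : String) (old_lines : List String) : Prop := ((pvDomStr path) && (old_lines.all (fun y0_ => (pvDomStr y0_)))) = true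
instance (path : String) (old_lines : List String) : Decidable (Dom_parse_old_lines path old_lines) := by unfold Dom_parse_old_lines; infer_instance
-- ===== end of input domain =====

-- B replaces A's per-line skip_next state machine by a block decomposition (split at blank
-- lines; drop a blank separator iff its preceding block contains a marker): alternative, same cost.


-- ===== PORT A =====
-- literal port of A: one pass, state (new_lines, skip_next); the enumerate index i is unused
-- in A's body, so the fold runs over the lines themselves.
def parse_old_lines (path : String) (old_lines : List String) : List String :=
  (old_lines.foldl (fun (st : List String × Bool) line =>
      if ["P103", "#6"].any (fun key => PySem.Str.isIn key line) then (st.1, true)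
      else if st.2 && (PySem.Str.strip line == "") then (st.1, false)
      else (st.1 ++ [line], st.2))
    ([], false)).1

-- ===== PORT B =====
-- B's helper has_marker
def hasMarker (line : String) : Bool := PySem.Str.isIn "P103" line || PySem.Str.isIn "#6" line

-- inner while loop of B: first index k ≥ j with old_lines[k].strip() == "" (or n).
-- fuel makes the recursion structural (kernel-reducible); lines.length - j steps always suffice.
def findBlankAux (lines : List String) : Nat → Nat → Nat
  | 0, j => j
  | fuel + 1, j =>
    if j < lines.length ∧ ¬((PySem.Str.strip (lines.getD j "") == "") = true) then
      findBlankAux lines fuel (j + 1)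
    else j

def findBlankFrom (lines : List String) (j : Nat) : Nat :=
  findBlankAux lines (lines.length - j) j

-- outer while loop of B, same fuel discipline (lines.length + 1 - i steps suffice)
def goAux (lines : List String) : Nat → Nat → List String
  | 0, _ => []
  | fuel + 1, i =>
    if i < lines.length then
      let j := findBlankFrom lines i
      let block := PySem.List.slice lines (some (i : Int)) (some (j : Int))
      (block.filter (fun l => !hasMarker l)) ++
        (if j < lines.length && !(block.any hasMarker) then [lines.getD j ""] else []) ++
        goAux lines fuel (j + 1)
    else []

def parse_old_lines_alt (path : String) (old_lines : List String) : List String :=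
  goAux old_lines (old_lines.length + 1) 0

-- ===== PRECONDITION & SPEC =====
def Spec_parse_old_lines (path : String) (old_lines : List String) (out : List String) : Prop := out = parse_old_lines_alt path old_lines
instance (path : String) (old_lines : List String) (out : List String) : Decidable (Spec_parse_old_lines path old_lines out) := by unfold Spec_parse_old_lines; infer_instance

-- ===== CLAIM (what is proved, stated in full; the proofs are below) =====
def Claim_equal_parse_old_lines : Prop := ∀ (path : String) (old_lines : List String), Dom_parse_old_lines path old_lines → Spec_parse_old_lines path old_lines (parse_old_lines path old_lines)

-- ===== LEMMAS AND PROOFS =====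

-- reference machine: A's loop without the accumulator
def mach : Bool → List String → List String
  | _, [] => []
  | b, l :: ls =>
    if hasMarker l then mach true ls
    else if b && (PySem.Str.strip l == "") then mach false ls
    else l :: mach b ls

theorem A_cond_eq (line : String) :
    (["P103", "#6"].any (fun key => PySem.Str.isIn key line)) = hasMarker line := by
  simp [hasMarker]

theorem A_foldl (ls : List String) (acc : List String) (b : Bool) :
    (ls.foldl (fun (st : List String × Bool) line =>
      if ["P103", "#6"].any (fun key => PySem.Str.isIn key line) then (st.1, true)
      else if st.2 && (PySem.Str.strip line == "") then (st.1, false)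
      else (st.1 ++ [line], st.2)) (acc, b)).1 = acc ++ mach b ls := by
  induction ls generalizing acc b with
  | nil => simp [mach]
  | cons l ls ih =>
    simp only [A_cond_eq] at ih
    simp only [List.foldl_cons, A_cond_eq, mach]
    split_ifs with h1 h2
    · exact ih acc true
    · exact ih acc false
    · rw [ih]; simp

-- a line whose strip() is empty is all whitespace
theorem strip_nil_all_space {cs : List Char} (h : PySem.Chars.strip cs = []) :
    ∀ c ∈ cs, PySem.Chars.isspace c = true := by
  intro c hc
  simp only [PySem.Chars.strip, PySem.Chars.rstrip, PySem.Chars.lstrip,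
    List.reverse_eq_nil_iff] at h
  rw [List.dropWhile_eq_nil_iff] at h
  have hsplit := List.takeWhile_append_dropWhile (p := PySem.Chars.isspace) (l := cs)
  rw [← hsplit] at hc
  rcases List.mem_append.mp hc with h1 | h1
  · exact List.mem_takeWhile_imp h1
  · exact h c (List.mem_reverse.mpr h1)

-- a blank line contains no marker
theorem blank_not_marker {l : String} (h : (PySem.Str.strip l == "") = true) :
    hasMarker l = false := by
  have hnil : PySem.Chars.strip l.toList = [] := by
    have h2 : PySem.Str.strip l = "" := eq_of_beq h
    have := congrArg String.toList h2
    simpa [PySem.Str.strip] using this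
  have hall := strip_nil_all_space hnil
  by_contra hm
  simp only [hasMarker, Bool.not_eq_false, Bool.or_eq_true] at hm
  rcases hm with hm | hm
  · rcases (PySem.Str.isIn_iff_infix _ _).mp hm with ⟨s, t, hst⟩
    have hP : 'P' ∈ l.toList := by rw [← hst]; simp
    have := hall 'P' hP
    simp [PySem.Chars.isspace] at this
  · rcases (PySem.Str.isIn_iff_infix _ _).mp hm with ⟨s, t, hst⟩
    have hH : '#' ∈ l.toList := by rw [← hst]; simp
    have := hall '#' hH
    simp [PySem.Chars.isspace] at this

theorem mach_nonblank_append (block rest : List String) (b : Bool)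
    (h : ∀ l ∈ block, ((PySem.Str.strip l == "") = false)) :
    mach b (block ++ rest)
      = block.filter (fun l => !hasMarker l) ++ mach (b || block.any hasMarker) rest := by
  induction block generalizing b with
  | nil => simp
  | cons l bl ih =>
    have hl := h l (List.mem_cons_self)
    have hrest : ∀ x ∈ bl, ((PySem.Str.strip x == "") = false) := fun x hx => h x (List.mem_cons_of_mem _ hx)
    simp only [List.cons_append, mach]
    by_cases hm : hasMarker l
    · simp [hm, ih _ hrest]
    · simp [hm, hl, ih _ hrest]

theorem findBlankAux_ge (lines : List String) (fuel j : Nat) : j ≤ findBlankAux lines fuel j := by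
  induction fuel generalizing j with
  | zero => simp [findBlankAux]
  | succ fuel ih =>
    simp only [findBlankAux]
    split
    · exact le_trans (by omega) (ih (j + 1))
    · omega

theorem findBlankFrom_ge (lines : List String) (j : Nat) : j ≤ findBlankFrom lines j :=
  findBlankAux_ge lines _ j

theorem findBlankAux_le (lines : List String) (fuel j : Nat) (h : j ≤ lines.length) :
    findBlankAux lines fuel j ≤ lines.length := by
  induction fuel generalizing j with
  | zero => simpa [findBlankAux]
  | succ fuel ih =>
    simp only [findBlankAux]
    by_cases hcond : j < lines.length ∧ ¬((PySem.Str.strip (lines.getD j "") == "") = true)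
    · rw [if_pos hcond]; exact ih (j + 1) (by omega)
    · rw [if_neg hcond]; omega

theorem findBlankFrom_le (lines : List String) (j : Nat) (h : j ≤ lines.length) :
    findBlankFrom lines j ≤ lines.length :=
  findBlankAux_le lines _ j h

theorem findBlankAux_blank (lines : List String) (fuel j : Nat) (hf : lines.length ≤ j + fuel)
    (h : findBlankAux lines fuel j < lines.length) :
    (PySem.Str.strip (lines.getD (findBlankAux lines fuel j) "") == "") = true := by
  induction fuel generalizing j with
  | zero => simp only [findBlankAux] at h ⊢; omega
  | succ fuel ih =>
    simp only [findBlankAux] at h ⊢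
    by_cases hcond : j < lines.length ∧ ¬((PySem.Str.strip (lines.getD j "") == "") = true)
    · rw [if_pos hcond] at h ⊢
      exact ih (j + 1) (by omega) h
    · rw [if_neg hcond] at h ⊢
      by_cases hb : ((PySem.Str.strip (lines.getD j "") == "") = true)
      · exact hb
      · exact absurd ⟨h, hb⟩ hcond

theorem findBlankAux_between (lines : List String) (fuel j : Nat) :
    ∀ k, j ≤ k → k < findBlankAux lines fuel j →
      ((PySem.Str.strip (lines.getD k "") == "") = false) := by
  induction fuel generalizing j with
  | zero => intro k h1 h2; simp [findBlankAux] at h2; omega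
  | succ fuel ih =>
    intro k h1 h2
    simp only [findBlankAux] at h2
    by_cases hcond : j < lines.length ∧ ¬((PySem.Str.strip (lines.getD j "") == "") = true)
    · rw [if_pos hcond] at h2
      rcases Nat.eq_or_lt_of_le h1 with rfl | hlt
      · simpa using hcond.2
      · exact ih (j + 1) k hlt h2
    · rw [if_neg hcond] at h2; omega

theorem findBlankFrom_blank (lines : List String) (j : Nat)
    (h : findBlankFrom lines j < lines.length) :
    (PySem.Str.strip (lines.getD (findBlankFrom lines j) "") == "") = true :=
  findBlankAux_blank lines _ j (by omega) h

theorem findBlankFrom_between (lines : List String) (j : Nat) :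
    ∀ k, j ≤ k → k < findBlankFrom lines j →
      ((PySem.Str.strip (lines.getD k "") == "") = false) :=
  findBlankAux_between lines _ j

theorem block_nonblank (lines : List String) (i j : Nat) (hij : i ≤ j)
    (hjn : j ≤ lines.length) (hb : ∀ k, i ≤ k → k < j → ((PySem.Str.strip (lines.getD k "") == "") = false)) :
    ∀ l ∈ (lines.drop i).take (j - i), ((PySem.Str.strip l == "") = false) := by
  intro l hl
  rcases List.mem_iff_getElem.mp hl with ⟨m, hm, hlm⟩
  have hm' : m < j - i := by
    have := hm; simp [List.length_take, List.length_drop] at this; omega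
  have hmd : m < (lines.drop i).length := by
    simp [List.length_drop]; omega
  have h1 : ((lines.drop i).take (j - i))[m] = lines[i + m]'(by omega) := by
    rw [List.getElem_take, List.getElem_drop]
  have h2 : lines.getD (i + m) "" = l := by
    rw [List.getD_eq_getElem _ _ (by omega), ← h1, hlm]
  have := hb (i + m) (by omega) (by omega)
  rwa [h2] at this

theorem goAux_eq_mach (lines : List String) (fuel i : Nat)
    (hf : lines.length + 1 ≤ i + fuel) :
    goAux lines fuel i = mach false (lines.drop i) := by
  induction fuel generalizing i with
  | zero =>
    have hnil : lines.drop i = [] := List.drop_eq_nil_of_le (by omega)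
    simp [goAux, hnil, mach]
  | succ fuel ih =>
    simp only [goAux]
    by_cases h : i < lines.length
    · rw [if_pos h]
      set j := findBlankFrom lines i with hjdef
      have hij : i ≤ j := findBlankFrom_ge lines i
      have hjn : j ≤ lines.length := findBlankFrom_le lines i (by omega)
      have ihj := ih (j + 1) (by omega)
      set block := PySem.List.slice lines (some (i : Int)) (some (j : Int)) with hbdef
      have hslice : block = (lines.drop i).take (j - i) := by
        simp [hbdef, PySem.List.slice_natCast]
      have hdrop2 : (lines.drop i).drop (j - i) = lines.drop j := by
        rw [List.drop_drop]; congr 1; omega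
      have hdecomp : lines.drop i = block ++ lines.drop j := by
        rw [hslice, ← hdrop2, List.take_append_drop]
      have hblock : ∀ l ∈ block, ((PySem.Str.strip l == "") = false) := by
        rw [hslice]
        exact block_nonblank lines i j hij hjn (findBlankFrom_between lines i)
      rw [hdecomp, mach_nonblank_append _ _ _ hblock, Bool.false_or, ihj]
      by_cases hjlt : j < lines.length
      · have hbl : (PySem.Str.strip (lines.getD j "") == "") = true := findBlankFrom_blank lines i hjlt
        have heq : PySem.Str.strip (lines[j]'hjlt) = "" := by
          have h3 := eq_of_beq hbl
          rwa [List.getD_eq_getElem _ _ hjlt] at h3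
        have hdj : lines.drop j = lines.getD j "" :: lines.drop (j + 1) := by
          rw [List.getD_eq_getElem _ _ hjlt]
          exact List.drop_eq_getElem_cons hjlt
        rw [hdj]
        simp only [mach, blank_not_marker hbl]
        by_cases hany : block.any hasMarker
        · simp [hany, heq, hjlt]
        · simp [hany, heq, hjlt]
      · have hj : lines.drop j = [] := List.drop_eq_nil_of_le (by omega)
        have hj1 : lines.drop (j + 1) = [] := List.drop_eq_nil_of_le (by omega)
        simp [hj, hj1, mach, hjlt]
    · rw [if_neg h]
      have hnil : lines.drop i = [] := List.drop_eq_nil_of_le (by omega)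
      simp [hnil, mach]

-- ===== VERDICT (by name: the statement is the Claim_ definition above) =====
theorem parse_old_lines_spec : Claim_equal_parse_old_lines := by
  intro path old_lines _
  unfold Spec_parse_old_lines parse_old_lines parse_old_lines_alt
  rw [A_foldl, goAux_eq_mach _ _ _ (by omega)]
  simp
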